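-- pv_equiv track=rewrite | github.com/rash335/logicalCalc | yappCalculator/functions.py | binary_decimal_unsigned
-- ===== SOURCE A (Python) =====
-- def binary_decimal_unsigned(binary,bits):
--     binary = binary.replace(' ','')
--     x=''; numlen = len(binary)
--     if numlen < bits:
--         for i in range(0,bits-numlen): x+='0'
--     x=x+binary;    binary=x;
--
--     rangeMin = 0;    rangeMax = 2**(bits)-1
--     num=0; i=0; exp=bits-1;
--     while i<bits:
--         num = num + 2**exp * int(binary[i]);
--         exp = exp-1;
--         i=i+1;
--
--     while (num>rangeMax):        num = num-2**bits;
--     while (num<rangeMin):        num = 0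
--     return num
-- ===== SOURCE B (Python) =====
-- def binary_decimal_unsigned(binary, bits):
--     digits = binary.replace(' ', '').rjust(bits, '0')[:bits]
--     num = 0
--     for ch in digits:
--         num = num * 2 + int(ch)
--     return num % 2 ** bits
-- ===== Notes on version B (the rewrite author's own statement) =====
-- stated objective: simpler
-- what changed: Replaces A's manual zero-pad loop, positional 2**exp power sum and the two while-clamp loops by rjust padding, a single Horner pass over the first `bits` characters, and one closed-form modulo 2**bits.
-- outside the precondition, e.g. on binary_decimal_unsigned('1', -1): A returns 0, B returns 0.0; on binary_decimal_unsigned('ab', -1): A returns 0, B raises ValueError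
import Mathlib
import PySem

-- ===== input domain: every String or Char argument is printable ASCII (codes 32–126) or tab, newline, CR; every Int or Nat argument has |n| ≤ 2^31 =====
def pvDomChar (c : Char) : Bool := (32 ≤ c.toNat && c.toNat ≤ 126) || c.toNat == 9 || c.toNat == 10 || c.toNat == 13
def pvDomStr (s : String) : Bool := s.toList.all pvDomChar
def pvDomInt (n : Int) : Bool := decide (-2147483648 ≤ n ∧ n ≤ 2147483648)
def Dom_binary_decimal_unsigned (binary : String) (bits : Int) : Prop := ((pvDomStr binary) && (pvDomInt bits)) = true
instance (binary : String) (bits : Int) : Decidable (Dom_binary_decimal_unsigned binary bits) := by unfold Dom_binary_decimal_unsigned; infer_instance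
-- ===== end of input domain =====

-- B replaces A's manual zero-pad loop, positional 2**exp power sum and the two while-clamp loops by
-- rjust padding, one Horner pass over the first `bits` characters and a single modulo 2**bits (objective: simpler).

-- ===== PORT A =====
-- int(binary[i]) on one character; Python raises ValueError on a non-digit — Pre_ excludes that, so .getD's default is never read
def pvDigit (c : Char) : Int := (PySem.Int.ofChars? [c]).getD 0

-- 'while num > rangeMax: num = num - p' with p = 2**bits ≥ 1; the '0 < p' test is only a totality guard (always true at the call)
def pvClampA (p rangeMax num : Int) : Int :=
  if _h : 0 < p ∧ rangeMax < num then pvClampA p rangeMax (num - p) else num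
termination_by (num - rangeMax).toNat
decreasing_by omega

def binary_decimal_unsigned (binary : String) (bits : Int) : Int :=
  let binary1 := PySem.Str.replace binary " " ""
  let numlen : Int := PySem.Str.len binary1
  let x : String :=
    if numlen < bits then
      (PySem.List.pyRange 0 (bits - numlen) 1).foldl (fun s _ => s ++ "0") ""
    else ""
  let binary2 := x ++ binary1
  let rangeMax : Int := 2 ^ bits.toNat - 1          -- 2**bits - 1; exact for 0 ≤ bits (Pre_)
  -- while i < bits: num += 2**exp * int(binary[i]); exp -= 1; i += 1   (exp ≥ 0 whenever it is read, so 2 ^ exp.toNat = 2**exp;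
  -- binary[i] is always in range for 0 ≤ bits, so pyGetD's default is never read)
  let st := (PySem.List.pyRange 0 bits 1).foldl
      (fun (st : Int × Int) i =>
        (st.1 + 2 ^ st.2.toNat * pvDigit (PySem.List.pyGetD binary2.toList i ' '), st.2 - 1))
      ((0 : Int), bits - 1)
  let num := pvClampA (2 ^ bits.toNat) rangeMax st.1
  if num < 0 then 0 else num                         -- 'while num < 0: num = 0' assigns once (rangeMin = 0) and exits

-- ===== PORT B =====
-- s.rjust(w, '0')
def pvRjust (s : String) (w : Int) : String :=
  String.ofList (List.replicate (w.toNat - s.length) '0' ++ s.toList)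

def binary_decimal_unsigned_alt (binary : String) (bits : Int) : Int :=
  let digits := PySem.Str.slice (pvRjust (PySem.Str.replace binary " " "") bits) none (some bits)
  let num := digits.toList.foldl (fun n c => n * 2 + pvDigit c) 0
  PySem.Int.mod num (2 ^ bits.toNat)                 -- num % 2**bits; exact for 0 ≤ bits (Pre_)

-- ===== PRECONDITION & SPEC =====
-- Pre_ keeps 0 ≤ bits (a negative bit-width is outside the task's natural domain: A's arithmetic there goes through
-- Python floats) and requires the first `bits` characters of the space-stripped, zero-padded string to be decimal
-- digits (on any other character Python's int() raises ValueError).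
def Pre_binary_decimal_unsigned (binary : String) (bits : Int) : Prop :=
  0 ≤ bits ∧ ((PySem.Str.replace binary " " "").toList.take bits.toNat).all (fun c => c.isDigit) = true
instance (binary : String) (bits : Int) : Decidable (Pre_binary_decimal_unsigned binary bits) := by
  unfold Pre_binary_decimal_unsigned; infer_instance

def pvWitness_binary_decimal_unsigned : String × Int := ("101", 3)

def Spec_binary_decimal_unsigned (binary : String) (bits : Int) (out : Int) : Prop := out = binary_decimal_unsigned_alt binary bits
instance (binary : String) (bits : Int) (out : Int) : Decidable (Spec_binary_decimal_unsigned binary bits out) := by unfold Spec_binary_decimal_unsigned; infer_instance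

-- ===== CLAIM (what is proved, stated in full; the proofs are below) =====
def Claim_equal_binary_decimal_unsigned : Prop := ∀ (binary : String) (bits : Int), Dom_binary_decimal_unsigned binary bits → Pre_binary_decimal_unsigned binary bits → Spec_binary_decimal_unsigned binary bits (binary_decimal_unsigned binary bits)

-- ===== LEMMAS AND PROOFS =====

-- positional base-2 value of a digit string, the common form both loop shapes are reduced to
def pvVal : List Char → Int
  | [] => 0
  | c :: tl => 2 ^ tl.length * pvDigit c + pvVal tl

theorem pvHorner_eq (l : List Char) : ∀ a : Int,
    l.foldl (fun n c => n * 2 + pvDigit c) a = a * 2 ^ l.length + pvVal l := by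
  induction l with
  | nil => intro a; simp [pvVal]
  | cons c tl ih =>
      intro a
      simp only [List.foldl_cons, ih, pvVal, List.length_cons]
      ring

theorem pvAfold_eq (l : List Char) : ∀ a : Int,
    (l.foldl (fun (st : Int × Int) c => (st.1 + 2 ^ st.2.toNat * pvDigit c, st.2 - 1))
      (a, (l.length : Int) - 1)).1 = a + pvVal l := by
  induction l with
  | nil => intro a; simp [pvVal]
  | cons c tl ih =>
      intro a
      have h1 : ((c :: tl).length : Int) - 1 - 1 = (tl.length : Int) - 1 := by simp
      have h2 : (((c :: tl).length : Int) - 1).toNat = tl.length := by simp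
      simp only [List.foldl_cons, h1, h2, ih, pvVal]
      ring

theorem pvPadFold (l : List Int) : ∀ s : String,
    (l.foldl (fun (s : String) _ => s ++ "0") s).toList = s.toList ++ List.replicate l.length '0' := by
  induction l with
  | nil => intro s; simp
  | cons a tl ih =>
      intro s
      simp [List.foldl_cons, ih, List.replicate_succ]

theorem pvPad_toList (k : Int) (s : String) :
    ((PySem.List.pyRange 0 k 1).foldl (fun (s : String) _ => s ++ "0") s).toList
      = s.toList ++ List.replicate k.toNat '0' := by
  rw [pvPadFold]
  congr 2
  rw [PySem.List.length_pyRange_one]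
  omega

theorem pvClampA_eq (p : Int) (hp : 0 < p) : ∀ num : Int, 0 ≤ num →
    pvClampA p (p - 1) num = num % p := by
  have main : ∀ k : Nat, ∀ num : Int, num.toNat ≤ k → 0 ≤ num → pvClampA p (p - 1) num = num % p := by
    intro k
    induction k with
    | zero =>
        intro num hle h0
        have hnum : num = 0 := by omega
        subst hnum
        rw [pvClampA, dif_neg (by omega)]
        simp
    | succ k ih =>
        intro num hle h0
        rw [pvClampA]
        split_ifs with h
        · rw [ih (num - p) (by omega) (by omega), Int.sub_emod_right]
        · exact (Int.emod_eq_of_lt h0 (by omega)).symm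
  exact fun num h0 => main num.toNat num le_rfl h0

theorem pvDigit_zero : pvDigit '0' = 0 := by decide

theorem pvDigit_nonneg_of_digit (c : Char) (hc : c.isDigit = true) : 0 ≤ pvDigit c := by
  have hb : 48 ≤ c.toNat ∧ c.toNat ≤ 57 := by
    simp [Char.isDigit] at hc
    exact hc
  have he : Char.ofNat c.toNat = c := Char.ofNat_toNat c
  rw [← he]
  obtain ⟨h1, h2⟩ := hb
  interval_cases h : c.toNat <;> decide

theorem pvVal_nonneg (l : List Char) (h : ∀ c ∈ l, 0 ≤ pvDigit c) : 0 ≤ pvVal l := by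
  induction l with
  | nil => simp [pvVal]
  | cons c tl ih =>
      have hc := h c (by simp)
      have htl := ih (fun c hcm => h c (List.mem_cons_of_mem _ hcm))
      have : (0:Int) ≤ 2 ^ tl.length * pvDigit c := by positivity
      simp only [pvVal]; omega

theorem pv_main (binary : String) (bits : Int) (hb : 0 ≤ bits)
    (hdig : ∀ c ∈ (PySem.Str.replace binary " " "").toList.take bits.toNat, c.isDigit = true) :
    binary_decimal_unsigned binary bits = binary_decimal_unsigned_alt binary bits := by
  unfold binary_decimal_unsigned binary_decimal_unsigned_alt
  simp only [PySem.Str.len_eq, String.toList_append]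
  set t := (PySem.Str.replace binary " " "").toList with ht
  set n := bits.toNat with hn
  have hbn : bits = (n : Int) := by omega
  set P : List Char := List.replicate (n - t.length) '0' ++ t with hPdef
  have hPlen : n ≤ P.length := by
    rw [hPdef]; simp; omega
  have hP : ((if (t.length : Int) < bits then
        (PySem.List.pyRange 0 (bits - (t.length : Int)) 1).foldl (fun (s : String) _ => s ++ "0") ""
      else "").toList ++ t) = P := by
    rw [hPdef]
    split_ifs with hlt
    · rw [pvPad_toList]
      simp
      omega
    · simp
      omega
  rw [hP]
  have htake_len : (P.take n).length = n := by simp [hPlen]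
  have hv0 : 0 ≤ pvVal (P.take n) := by
    apply pvVal_nonneg
    intro c hc
    rw [hPdef, List.take_append] at hc
    rcases List.mem_append.1 hc with h | h
    · rw [List.take_replicate] at h
      rw [List.eq_of_mem_replicate h, pvDigit_zero]
    · apply pvDigit_nonneg_of_digit
      apply hdig
      have hle : n - (List.replicate (n - t.length) '0').length ≤ n := by simp
      have : List.take (n - (List.replicate (n - t.length) '0').length) t
          = (t.take n).take (n - (List.replicate (n - t.length) '0').length) := by
        rw [List.take_take, min_eq_left hle]
      rw [this] at h
      exact List.take_subset _ _ h
  have hfold1 : ((PySem.List.pyRange 0 bits 1).foldl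
      (fun (st : Int × Int) i =>
        (st.1 + 2 ^ st.2.toNat * pvDigit (PySem.List.pyGetD P i ' '), st.2 - 1))
      ((0 : Int), bits - 1)).1 = pvVal (P.take n) := by
    rw [PySem.List.foldl_congr_mem _ _
      (fun (st : Int × Int) (i : Int) =>
        (st.1 + 2 ^ st.2.toNat * pvDigit (PySem.List.pyGetD (P.take n) i ' '), st.2 - 1)) _ ?_]
    · have hr : PySem.List.pyRange 0 bits 1 = PySem.List.pyRange 0 ((P.take n).length : Int) 1 := by
        rw [htake_len, hbn]
      rw [hr, PySem.List.foldl_pyRange_zero_pyGetD' (P.take n) ' '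
        (fun (st : Int × Int) (c : Char) =>
          (st.1 + 2 ^ st.2.toNat * pvDigit c, st.2 - 1)) ((0 : Int), bits - 1)]
      have hinit : (bits : Int) - 1 = ((P.take n).length : Int) - 1 := by rw [htake_len, hbn]
      rw [hinit, pvAfold_eq]
      simp
    · intro acc i hi
      rw [PySem.List.mem_pyRange_one] at hi
      have h0 : 0 ≤ i := hi.1
      have h1 : i.toNat < n := by omega
      beta_reduce
      rw [PySem.List.pyGetD_eq_getElem P ' ' h0 (by omega),
          PySem.List.pyGetD_eq_getElem (P.take n) ' ' h0 (by rw [htake_len]; omega)]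
      simp [List.getElem_take]
  rw [hfold1]
  have hBlist : (PySem.Str.slice (pvRjust (PySem.Str.replace binary " " "") bits) none (some bits)).toList
      = P.take n := by
    rw [PySem.Str.toList_slice, PySem.Chars.slice_eq_listSlice, PySem.List.slice_to _ hb]
    rw [pvRjust]
    simp [hPdef, ← ht, ← hn, ← String.length_toList]
  rw [hBlist]
  rw [pvHorner_eq]
  simp only [zero_mul, zero_add]
  have hppos : (0 : Int) < 2 ^ n := by positivity
  rw [PySem.Int.mod_eq_emod_of_pos hppos]
  rw [pvClampA_eq (2 ^ n) hppos _ hv0]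
  rw [if_neg]
  simp
  exact Int.emod_nonneg _ (by omega)

-- ===== VERDICT (by name: the statement is the Claim_ definition above) =====
theorem binary_decimal_unsigned_spec : Claim_equal_binary_decimal_unsigned := by
  intro binary bits _hdom hpre
  exact pv_main binary bits hpre.1 (List.all_eq_true.1 hpre.2)
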